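-- pv_equiv track=rewrite | github.com/senyboy10/PythonCourseMentor | Python/HW 4/hw4files/hw4files/alsenyTest2.py | totalMedals
-- ===== SOURCE A (Python) =====
-- def totalMedals(medalsXXXX):
-- 	totals = list((0,0,0,0))
-- 	for x in medalsXXXX:
-- 		#gold
-- 		totals[0] += x[1]
-- 		#silver
-- 		totals[1] += x[2]
-- 		#Bronze
-- 		totals[2] += x[3]
-- 		#Total
-- 		totals[3] += x[4]
--
-- 	return totals
-- ===== SOURCE B (Python) =====
-- def totalMedals(medalsXXXX):
--     return [sum(row[i] for row in medalsXXXX) for i in (1, 2, 3, 4)]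
-- ===== Notes on version B (the rewrite author's own statement) =====
-- stated objective: simpler
-- what changed: Column-major computation: four full passes, one per medal column, each summing that column, instead of one row-major pass maintaining a four-slot mutable totals list.
import Mathlib
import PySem

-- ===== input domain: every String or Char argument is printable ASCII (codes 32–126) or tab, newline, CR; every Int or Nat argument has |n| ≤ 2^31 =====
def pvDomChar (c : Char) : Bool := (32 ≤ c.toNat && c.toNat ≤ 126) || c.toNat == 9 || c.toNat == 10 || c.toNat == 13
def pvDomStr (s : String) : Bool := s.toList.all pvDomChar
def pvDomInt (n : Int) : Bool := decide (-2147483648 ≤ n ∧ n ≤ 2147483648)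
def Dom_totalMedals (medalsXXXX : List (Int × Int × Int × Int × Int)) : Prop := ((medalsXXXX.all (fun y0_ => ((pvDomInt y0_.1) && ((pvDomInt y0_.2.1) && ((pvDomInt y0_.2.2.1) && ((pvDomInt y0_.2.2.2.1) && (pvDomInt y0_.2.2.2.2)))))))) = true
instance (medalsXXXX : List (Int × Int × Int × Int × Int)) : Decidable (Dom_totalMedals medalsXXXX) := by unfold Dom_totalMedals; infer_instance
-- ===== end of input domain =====

-- B changes the decomposition: four column-major passes (one sum per medal column)
-- instead of A's single row-major pass updating a mutable four-slot totals list; objective: simpler.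

-- ===== PORT A =====
-- A: one pass, mutable totals list of 4 slots updated in place per row.
def totalMedals (medalsXXXX : List (Int × Int × Int × Int × Int)) : List Int :=
  let totals : List Int := [0, 0, 0, 0]
  medalsXXXX.foldl (fun totals x =>
    let totals := totals.set 0 (totals.getD 0 0 + x.2.1)
    let totals := totals.set 1 (totals.getD 1 0 + x.2.2.1)
    let totals := totals.set 2 (totals.getD 2 0 + x.2.2.2.1)
    totals.set 3 (totals.getD 3 0 + x.2.2.2.2)) totals

-- ===== PORT B =====
-- B: column-by-column — for each of the four columns, a full pass summing that column.
def totalMedals_alt (medalsXXXX : List (Int × Int × Int × Int × Int)) : List Int :=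
  [ (medalsXXXX.map (fun row => row.2.1)).sum
  , (medalsXXXX.map (fun row => row.2.2.1)).sum
  , (medalsXXXX.map (fun row => row.2.2.2.1)).sum
  , (medalsXXXX.map (fun row => row.2.2.2.2)).sum ]

-- ===== PRECONDITION & SPEC =====
def Spec_totalMedals (medalsXXXX : List (Int × Int × Int × Int × Int)) (out : List Int) : Prop := out = totalMedals_alt medalsXXXX
instance (medalsXXXX : List (Int × Int × Int × Int × Int)) (out : List Int) : Decidable (Spec_totalMedals medalsXXXX out) := by unfold Spec_totalMedals; infer_instance

-- ===== CLAIM (what is proved, stated in full; the proofs are below) =====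
def Claim_equal_totalMedals : Prop := ∀ (medalsXXXX : List (Int × Int × Int × Int × Int)), Dom_totalMedals medalsXXXX → Spec_totalMedals medalsXXXX (totalMedals medalsXXXX)

-- ===== LEMMAS AND PROOFS =====

theorem totalMedals_foldl_inv (l : List (Int × Int × Int × Int × Int)) (a b c d : Int) :
    l.foldl (fun totals x =>
      let totals := totals.set 0 (totals.getD 0 0 + x.2.1)
      let totals := totals.set 1 (totals.getD 1 0 + x.2.2.1)
      let totals := totals.set 2 (totals.getD 2 0 + x.2.2.2.1)
      totals.set 3 (totals.getD 3 0 + x.2.2.2.2)) [a, b, c, d]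
    = [ a + (l.map (fun row => row.2.1)).sum
      , b + (l.map (fun row => row.2.2.1)).sum
      , c + (l.map (fun row => row.2.2.2.1)).sum
      , d + (l.map (fun row => row.2.2.2.2)).sum ] := by
  induction l generalizing a b c d with
  | nil => simp
  | cons x xs ih =>
    simp only [List.foldl_cons, List.map_cons, List.sum_cons]
    rw [show (List.set [a,b,c,d] 0 (List.getD [a,b,c,d] 0 0 + x.2.1)) = [a + x.2.1, b, c, d] by simp]
    rw [show (List.set [a + x.2.1, b, c, d] 1 (List.getD [a + x.2.1, b, c, d] 1 0 + x.2.2.1)) = [a + x.2.1, b + x.2.2.1, c, d] by simp]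
    rw [show (List.set [a + x.2.1, b + x.2.2.1, c, d] 2 (List.getD [a + x.2.1, b + x.2.2.1, c, d] 2 0 + x.2.2.2.1)) = [a + x.2.1, b + x.2.2.1, c + x.2.2.2.1, d] by simp]
    rw [show (List.set [a + x.2.1, b + x.2.2.1, c + x.2.2.2.1, d] 3 (List.getD [a + x.2.1, b + x.2.2.1, c + x.2.2.2.1, d] 3 0 + x.2.2.2.2)) = [a + x.2.1, b + x.2.2.1, c + x.2.2.2.1, d + x.2.2.2.2] by simp]
    rw [ih]
    simp only [List.cons.injEq, and_true]
    refine ⟨by ring, by ring, by ring, by ring⟩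

-- ===== VERDICT (by name: the statement is the Claim_ definition above) =====
theorem totalMedals_spec : Claim_equal_totalMedals := by
  intro l _
  unfold Spec_totalMedals totalMedals totalMedals_alt
  simpa using totalMedals_foldl_inv l 0 0 0 0
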